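-- pv_equiv track=rewrite | github.com/louisna/LINGI2364-MiningPattern | Project2-SequenceMining/supervised_closed_sequence_mining_info_gain.py | filter_trans
-- ===== SOURCE A (Python) =====
-- def filter_trans(trans, first_occ_added_symbol):
--     # TODO: SPEED-UP: check if the remaining transactions are not enough to make it frequent item
--     out = []
--     index_first = 0
--     # tn = transaction number, tp = transaction position
--     for (tn, tp) in trans:
--         while first_occ_added_symbol[index_first][0] < tn:
--             index_first += 1
--             if index_first >= len(first_occ_added_symbol):
--                 return out  # Visited all
--         if tn < first_occ_added_symbol[index_first][0]:
--             continue  # Current tn not in the projection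
--         # Assume same transaction number now
--         # Position in the transaction is bigger
--         if tp > first_occ_added_symbol[index_first][1]:
--             out.append((tn, tp))
--     return out
-- ===== SOURCE B (Python) =====
-- def filter_trans(trans, first_occ_added_symbol):
--     # Loop inversion: iterate first-occurrence entries as the OUTER loop and, for
--     # each entry (fn, fp), consume the run of transactions with tn <= fn, emitting
--     # the ones in the same transaction (tn == fn) at a later position (tp > fp).
--     # This removes A's pointer into first_occ_added_symbol and its early return:
--     # transactions left over after the last entry are dropped simply by stopping.
--     out = []
--     k = 0
--     n = len(trans)
--     for fn, fp in first_occ_added_symbol: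
--         while k < n and trans[k][0] <= fn:
--             tn, tp = trans[k]
--             if tn == fn and tp > fp:
--                 out.append((tn, tp))
--             k += 1
--     return out
-- ===== Notes on version B (the rewrite author's own statement) =====
-- stated objective: alternative
-- what changed: B inverts the loops: first_occ_added_symbol becomes the OUTER loop and each entry consumes the run of transactions with tn <= fn from a cursor into trans, so A's monotone pointer into first_occ_added_symbol, its inner advancing while-loop and its mid-loop early return all disappear.
-- outside the precondition, e.g. on filter_trans([(1, 1)], []): A raises IndexError, B returns []
-- crash fix: When first_occ_added_symbol is empty and trans is non-empty, A raises IndexError on its unconditional first_occ_added_symbol[index_first] access; B naturally returns []. — e.g. on filter_trans([(1, 1)], []): A raises IndexError, B returns []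
import Mathlib
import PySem

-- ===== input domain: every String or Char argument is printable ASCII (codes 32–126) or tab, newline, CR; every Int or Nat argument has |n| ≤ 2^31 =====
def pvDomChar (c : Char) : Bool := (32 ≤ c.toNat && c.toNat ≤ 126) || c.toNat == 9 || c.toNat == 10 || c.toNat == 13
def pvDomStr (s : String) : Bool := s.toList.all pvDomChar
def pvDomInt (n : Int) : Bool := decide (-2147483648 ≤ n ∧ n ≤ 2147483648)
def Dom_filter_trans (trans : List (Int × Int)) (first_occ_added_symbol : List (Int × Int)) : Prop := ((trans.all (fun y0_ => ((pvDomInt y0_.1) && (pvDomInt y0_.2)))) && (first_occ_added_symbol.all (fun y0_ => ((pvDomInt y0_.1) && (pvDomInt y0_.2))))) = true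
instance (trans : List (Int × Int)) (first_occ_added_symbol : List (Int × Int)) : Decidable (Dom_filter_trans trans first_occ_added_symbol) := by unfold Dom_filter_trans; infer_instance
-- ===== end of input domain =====

-- B inverts the loops: first_occ_added_symbol is the outer loop and each entry consumes the run of
-- transactions with tn <= fn, removing A's pointer into first_occ and the mid-loop early return
-- (objective: alternative; equivalence proved wherever A returns).


-- ===== PORT A =====
-- A's inner `while first_occ[index_first][0] < tn: index_first += 1; if index_first >= len: return out`.
-- Returns `none` for the early `return out`; the `i ≥ length` fallthrough branch is the IndexError
-- case, reached only outside Pre_ (where nothing is claimed).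
def pyAdvA (fs : List (Int × Int)) (tn : Int) (i : Nat) : Option Nat :=
  if h : i < fs.length then
    if (fs.getD i (0, 0)).1 < tn then
      if h2 : i + 1 ≥ fs.length then none
      else pyAdvA fs tn (i + 1)
    else some i
  else some i
termination_by fs.length - i
decreasing_by omega

def loopA (fs : List (Int × Int)) : List (Int × Int) → Nat → List (Int × Int) → List (Int × Int)
  | [], _, out => out
  | (tn, tp) :: ts, i, out =>
    match pyAdvA fs tn i with
    | none => out
    | some j =>
      let c := fs.getD j (0, 0)
      if tn < c.1 then loopA fs ts j out
      else if tp > c.2 then loopA fs ts j (out ++ [(tn, tp)])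
      else loopA fs ts j out

def filter_trans (trans : List (Int × Int)) (first_occ_added_symbol : List (Int × Int)) : List (Int × Int) :=
  loopA first_occ_added_symbol trans 0 []

-- ===== PORT B =====
-- B's inner `while k < n and trans[k][0] <= fn`, as recursion on the remaining trans suffix.
def innerB (c : Int × Int) : List (Int × Int) → List (Int × Int) → (List (Int × Int)) × (List (Int × Int))
  | [], out => ([], out)
  | (tn, tp) :: ts, out =>
    if tn ≤ c.1 then innerB c ts (if tn = c.1 ∧ tp > c.2 then out ++ [(tn, tp)] else out)
    else ((tn, tp) :: ts, out)

-- B's outer `for fn, fp in first_occ_added_symbol`.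
def loopB : List (Int × Int) → List (Int × Int) → List (Int × Int) → List (Int × Int)
  | [], _, out => out
  | c :: cs, ts, out =>
    let r := innerB c ts out
    loopB cs r.1 r.2

def filter_trans_alt (trans : List (Int × Int)) (first_occ_added_symbol : List (Int × Int)) : List (Int × Int) :=
  loopB first_occ_added_symbol trans []

-- ===== PRECONDITION & SPEC =====
-- Pre_ excludes only the inputs where A raises IndexError: empty first_occ_added_symbol with
-- non-empty trans.
def Pre_filter_trans (trans : List (Int × Int)) (first_occ_added_symbol : List (Int × Int)) : Prop :=
  trans = [] ∨ first_occ_added_symbol ≠ []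
instance (trans : List (Int × Int)) (first_occ_added_symbol : List (Int × Int)) : Decidable (Pre_filter_trans trans first_occ_added_symbol) := by unfold Pre_filter_trans; infer_instance
def pvWitness_filter_trans : (List (Int × Int)) × (List (Int × Int)) := ([(1, 2)], [(1, 1)])

-- When first_occ_added_symbol is empty and trans is non-empty, A raises IndexError on its
-- unconditional first_occ_added_symbol[index_first] access; B naturally returns [].
def Raises_filter_trans (trans : List (Int × Int)) (first_occ_added_symbol : List (Int × Int)) : Prop :=
  trans ≠ [] ∧ first_occ_added_symbol = []
instance (trans : List (Int × Int)) (first_occ_added_symbol : List (Int × Int)) : Decidable (Raises_filter_trans trans first_occ_added_symbol) := by unfold Raises_filter_trans; infer_instance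
def pvRaiseWitness_filter_trans : (List (Int × Int)) × (List (Int × Int)) := ([(1, 1)], [])
def pvRaiseWitnessOut_filter_trans : List (Int × Int) := []

def Spec_filter_trans (trans : List (Int × Int)) (first_occ_added_symbol : List (Int × Int)) (out : List (Int × Int)) : Prop := out = filter_trans_alt trans first_occ_added_symbol
instance (trans : List (Int × Int)) (first_occ_added_symbol : List (Int × Int)) (out : List (Int × Int)) : Decidable (Spec_filter_trans trans first_occ_added_symbol out) := by unfold Spec_filter_trans; infer_instance

-- ===== CLAIM (what is proved, stated in full; the proofs are below) =====
def Claim_equal_filter_trans : Prop := ∀ (trans : List (Int × Int)) (first_occ_added_symbol : List (Int × Int)), Dom_filter_trans trans first_occ_added_symbol → Pre_filter_trans trans first_occ_added_symbol → Spec_filter_trans trans first_occ_added_symbol (filter_trans trans first_occ_added_symbol)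
def Claim_raises_filter_trans : Prop := (∀ (trans : List (Int × Int)) (first_occ_added_symbol : List (Int × Int)), Dom_filter_trans trans first_occ_added_symbol → Raises_filter_trans trans first_occ_added_symbol → ¬ Pre_filter_trans trans first_occ_added_symbol) ∧ (Dom_filter_trans (pvRaiseWitness_filter_trans.1) (pvRaiseWitness_filter_trans.2) ∧ Raises_filter_trans (pvRaiseWitness_filter_trans.1) (pvRaiseWitness_filter_trans.2) ∧ filter_trans_alt (pvRaiseWitness_filter_trans.1) (pvRaiseWitness_filter_trans.2) = pvRaiseWitnessOut_filter_trans)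

-- ===== LEMMAS AND PROOFS =====

theorem pyAdvA_stop (fs : List (Int × Int)) (tn : Int) (i : Nat) (hi : i < fs.length)
    (h : ¬ (fs.getD i (0, 0)).1 < tn) : pyAdvA fs tn i = some i := by
  rw [pyAdvA]; simp only [hi, dif_pos, if_neg h]

theorem pyAdvA_none (fs : List (Int × Int)) (tn : Int) (i : Nat) (hi : i < fs.length)
    (h : (fs.getD i (0, 0)).1 < tn) (hend : fs.length ≤ i + 1) : pyAdvA fs tn i = none := by
  rw [pyAdvA]; simp only [hi, dif_pos, if_pos h]
  rw [dif_pos hend]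

theorem pyAdvA_step (fs : List (Int × Int)) (tn : Int) (i : Nat) (hi : i < fs.length)
    (h : (fs.getD i (0, 0)).1 < tn) (hend : i + 1 < fs.length) :
    pyAdvA fs tn i = pyAdvA fs tn (i + 1) := by
  rw [pyAdvA]; simp only [hi, dif_pos, if_pos h]
  rw [dif_neg (by omega)]

theorem loopA_cons (fs : List (Int × Int)) (tn tp : Int) (ts : List (Int × Int))
    (i : Nat) (out : List (Int × Int)) :
    loopA fs ((tn, tp) :: ts) i out =
      match pyAdvA fs tn i with
      | none => out
      | some j =>
        let c := fs.getD j (0, 0)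
        if tn < c.1 then loopA fs ts j out
        else if tp > c.2 then loopA fs ts j (out ++ [(tn, tp)])
        else loopA fs ts j out := rfl

theorem loopB_nil_ts (cs : List (Int × Int)) (out : List (Int × Int)) :
    loopB cs [] out = out := by
  induction cs with
  | nil => rfl
  | cons c cs ih => simpa [loopB, innerB] using ih

theorem loopB_consume (c : Int × Int) (cs : List (Int × Int)) (tn tp : Int)
    (ts out : List (Int × Int)) (h : tn ≤ c.1) :
    loopB (c :: cs) ((tn, tp) :: ts) out =
      loopB (c :: cs) ts (if tn = c.1 ∧ tp > c.2 then out ++ [(tn, tp)] else out) := by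
  simp only [loopB, innerB, if_pos h]

theorem loopB_skip (c : Int × Int) (cs : List (Int × Int)) (tn tp : Int)
    (ts out : List (Int × Int)) (h : ¬ tn ≤ c.1) :
    loopB (c :: cs) ((tn, tp) :: ts) out = loopB cs ((tn, tp) :: ts) out := by
  simp only [loopB, innerB, if_neg h]

theorem loopA_eq_loopB (fs : List (Int × Int)) :
    ∀ (n : Nat) (ts : List (Int × Int)) (i : Nat) (out : List (Int × Int)),
      ts.length + (fs.length - i) ≤ n → i < fs.length →
      loopA fs ts i out = loopB (fs.drop i) ts out := by
  intro n
  induction n with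
  | zero => intro ts i out hle hi; omega
  | succ n ih =>
    intro ts i out hle hi
    match ts with
    | [] => simp [loopA, loopB_nil_ts]
    | (tn, tp) :: ts' =>
      simp only [List.length_cons] at hle
      have hdrop : fs.drop i = fs.getD i (0, 0) :: fs.drop (i + 1) := by
        rw [List.drop_eq_getElem_cons hi, List.getD_eq_getElem fs (0, 0) hi]
      by_cases hcmp : (fs.getD i (0, 0)).1 < tn
      · by_cases hend : fs.length ≤ i + 1
        · rw [loopA_cons, pyAdvA_none fs tn i hi hcmp hend, hdrop,
            loopB_skip _ _ _ _ _ _ (by omega), List.drop_eq_nil_iff.mpr (by omega)]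
          rfl
        · have hi1 : i + 1 < fs.length := by omega
          rw [loopA_cons, pyAdvA_step fs tn i hi hcmp hi1, ← loopA_cons,
            ih ((tn, tp) :: ts') (i + 1) out (by simp only [List.length_cons]; omega) hi1,
            hdrop, loopB_skip _ _ _ _ _ _ (by omega)]
      · rw [loopA_cons, pyAdvA_stop fs tn i hi hcmp, hdrop,
          loopB_consume _ _ _ _ _ _ (by omega), ← hdrop]
        by_cases hlt : tn < (fs.getD i (0, 0)).1
        · rw [if_neg (by intro h; omega)]
          simp only [if_pos hlt]
          exact ih ts' i out (by omega) hi
        · have heq : tn = (fs.getD i (0, 0)).1 := by omega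
          by_cases hgt : tp > (fs.getD i (0, 0)).2
          · rw [if_pos ⟨heq, hgt⟩]
            simp only [if_neg hlt, if_pos hgt]
            exact ih ts' i (out ++ [(tn, tp)]) (by omega) hi
          · rw [if_neg (by intro h; exact hgt h.2)]
            simp only [if_neg hlt, if_neg hgt]
            exact ih ts' i out (by omega) hi

-- ===== VERDICT (by name: the statement is the Claim_ definition above) =====
theorem filter_trans_spec : Claim_equal_filter_trans := by
  intro trans fs _ hpre
  unfold Spec_filter_trans
  match trans with
  | [] => simp [filter_trans, loopA, filter_trans_alt, loopB_nil_ts]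
  | (tn, tp) :: ts =>
    match fs with
    | [] => exact absurd hpre (by simp [Pre_filter_trans])
    | f :: rest =>
      have h0 : 0 < (f :: rest).length := by simp
      have h := loopA_eq_loopB (f :: rest) (((tn, tp) :: ts).length + (f :: rest).length)
        ((tn, tp) :: ts) 0 [] (by omega) h0
      simpa [filter_trans, filter_trans_alt] using h

@[simp] theorem filter_trans_raises : Claim_raises_filter_trans := by
  unfold Claim_raises_filter_trans
  refine ⟨?_, by decide, by decide, rfl⟩
  intro trans fs _ hr
  simp [Pre_filter_trans, Raises_filter_trans] at *
  exact ⟨hr.1, hr.2⟩
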